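-- pv_equiv track=rewrite | github.com/panlybero/GRAPE-MUST | problemGenerators/generate_data/plan_to_sat.py | check_trivial_unsat
-- ===== SOURCE A (Python) =====
-- def check_trivial_unsat(clauses):
--     forced_vars = {}
--     for clause in clauses:
--         if len(clause) == 1:
--             var = abs(clause[0])
--             val = clause[0] > 0
--             if var in forced_vars:
--                 if forced_vars[var] != val:
--                     return True
--             else:
--                 forced_vars[var] = val
--     return False
-- ===== SOURCE B (Python) =====
-- def check_trivial_unsat(clauses):
--     pos = {abs(c[0]) for c in clauses if len(c) == 1 and c[0] > 0}
--     neg = {abs(c[0]) for c in clauses if len(c) == 1 and c[0] <= 0}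
--     return bool(pos & neg)
-- ===== Notes on version B (the rewrite author's own statement) =====
-- stated objective: simpler
-- what changed: Replaces the stateful dict with early return by two set comprehensions (variables forced True vs forced False, same >0 / <=0 polarity split) and a single set-intersection check.
import Mathlib
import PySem

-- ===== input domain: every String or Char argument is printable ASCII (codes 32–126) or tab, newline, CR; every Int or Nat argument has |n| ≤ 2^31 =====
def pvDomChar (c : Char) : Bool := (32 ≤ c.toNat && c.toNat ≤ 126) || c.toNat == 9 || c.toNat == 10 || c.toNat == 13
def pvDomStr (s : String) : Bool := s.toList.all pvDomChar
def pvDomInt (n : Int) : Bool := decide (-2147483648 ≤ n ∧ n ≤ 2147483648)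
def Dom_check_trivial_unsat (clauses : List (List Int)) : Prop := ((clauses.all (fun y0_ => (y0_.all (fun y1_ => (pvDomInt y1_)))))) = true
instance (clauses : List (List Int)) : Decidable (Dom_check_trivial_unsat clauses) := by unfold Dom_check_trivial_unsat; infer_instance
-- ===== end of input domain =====

-- B replaces A's stateful dict with early return by two comprehension-built sets (variables
-- forced True / forced False) and one set-intersection check; objective: simpler.

-- ===== PORT A =====
-- loop over clauses with the forced_vars dict; 'match c with | [x]' is Python's
-- 'if len(clause) == 1' with x = clause[0] (exact: a list of length 1 is [x]).
def check_trivial_unsat_go (forced : PySem.Dict Int Bool) : List (List Int) → Bool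
  | [] => false
  | clause :: rest =>
    match clause with
    | [x] =>
      let var : Int := |x|
      let val : Bool := decide (x > 0)
      match forced.get? var with
      | some b => if b ≠ val then true else check_trivial_unsat_go forced rest
      | none => check_trivial_unsat_go (forced.insert var val) rest
    | _ => check_trivial_unsat_go forced rest

def check_trivial_unsat (clauses : List (List Int)) : Bool :=
  check_trivial_unsat_go PySem.Dict.empty clauses

-- ===== PORT B =====
-- the two set comprehensions (filterMap = the comprehension's filter+map), then bool(pos & neg)
def check_trivial_unsat_alt (clauses : List (List Int)) : Bool :=
  let pos : PySem.Set Int := PySem.Set.ofList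
    (clauses.filterMap fun c => match c with
      | [x] => if x > 0 then some |x| else none
      | _ => none)
  let neg : PySem.Set Int := PySem.Set.ofList
    (clauses.filterMap fun c => match c with
      | [x] => if x ≤ 0 then some |x| else none
      | _ => none)
  !(PySem.Set.inter pos neg).isEmpty

-- ===== PRECONDITION & SPEC =====
def Spec_check_trivial_unsat (clauses : List (List Int)) (out : Bool) : Prop := out = check_trivial_unsat_alt clauses
instance (clauses : List (List Int)) (out : Bool) : Decidable (Spec_check_trivial_unsat clauses out) := by unfold Spec_check_trivial_unsat; infer_instance

-- ===== CLAIM (what is proved, stated in full; the proofs are below) =====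
def Claim_equal_check_trivial_unsat : Prop := ∀ (clauses : List (List Int)), Dom_check_trivial_unsat clauses → Spec_check_trivial_unsat clauses (check_trivial_unsat clauses)

-- ===== LEMMAS AND PROOFS =====

-- the literals of the unit clauses of l, in order
def pvUnits (l : List (List Int)) : List Int :=
  l.filterMap fun c => match c with | [x] => some x | _ => none

-- "variable v is forced to value b" by the dict d together with the unit literals us
def pvForces (d : PySem.Dict Int Bool) (us : List Int) (v : Int) (b : Bool) : Prop :=
  d.get? v = some b ∨ ∃ x ∈ us, |x| = v ∧ decide (x > 0) = b

lemma pvForces_nil {d : PySem.Dict Int Bool} {v : Int} {b : Bool} :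
    pvForces d [] v b ↔ d.get? v = some b := by simp [pvForces]

lemma pvForces_cons {d : PySem.Dict Int Bool} {x : Int} {us : List Int} {v : Int} {b : Bool} :
    pvForces d (x :: us) v b ↔ (|x| = v ∧ decide (x > 0) = b) ∨ pvForces d us v b := by
  simp [pvForces]; tauto

lemma pvForces_insert {d : PySem.Dict Int Bool} {k : Int} {c : Bool} {us : List Int}
    {v : Int} {b : Bool} (h : d.get? k = none) :
    pvForces (d.insert k c) us v b ↔ (v = k ∧ c = b) ∨ pvForces d us v b := by
  simp only [pvForces, PySem.Dict.get?_insert]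
  by_cases hv : v = k
  · subst hv; simp [h]
  · simp [hv]

lemma pv_go_iff (l : List (List Int)) : ∀ d : PySem.Dict Int Bool,
    check_trivial_unsat_go d l = true ↔
      ∃ v, pvForces d (pvUnits l) v true ∧ pvForces d (pvUnits l) v false := by
  induction l with
  | nil =>
    intro d
    constructor
    · intro h; simp [check_trivial_unsat_go] at h
    · rintro ⟨v, h1, h2⟩
      simp only [pvUnits, List.filterMap_nil, pvForces_nil] at h1 h2
      rw [h1] at h2; cases h2
  | cons clause rest ih =>
    intro d
    match clause with
    | [] => simpa [check_trivial_unsat_go, pvUnits] using ih d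
    | x :: y :: ys => simpa [check_trivial_unsat_go, pvUnits] using ih d
    | [x] =>
      have hunits : pvUnits ([x] :: rest) = x :: pvUnits rest := by simp [pvUnits]
      rw [hunits]
      rcases hd : d.get? |x| with _ | b
      · -- fresh variable: A inserts; insertion = adding the literal's forcing
        have hstep : check_trivial_unsat_go d ([x] :: rest)
            = check_trivial_unsat_go (d.insert |x| (decide (x > 0))) rest := by
          simp [check_trivial_unsat_go, hd]
        rw [hstep, ih]
        have habs : ∀ v b', pvForces (d.insert |x| (decide (x > 0))) (pvUnits rest) v b'
            ↔ pvForces d (x :: pvUnits rest) v b' := by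
          intro v b'
          rw [pvForces_insert hd, pvForces_cons]
          constructor
          · rintro (⟨hv, hb'⟩ | h)
            · exact Or.inl ⟨hv.symm, hb'⟩
            · exact Or.inr h
          · rintro (⟨hv, hb'⟩ | h)
            · exact Or.inl ⟨hv.symm, hb'⟩
            · exact Or.inr h
        simp only [habs]
      · by_cases hb : b = decide (x > 0)
        · -- matching value: A skips, the extra literal is absorbed by the dict entry
          have habs : ∀ v b', pvForces d (x :: pvUnits rest) v b'
              ↔ pvForces d (pvUnits rest) v b' := by
            intro v b'
            rw [pvForces_cons]
            constructor
            · rintro (⟨hv, hb'⟩ | h)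
              · exact Or.inl (by rw [← hv, hd, hb, hb'])
              · exact h
            · exact Or.inr
          simp only [check_trivial_unsat_go, hd, hb, ne_eq, not_true_eq_false, if_false, habs]
          exact ih d
        · -- conflict: A returns True; v = |x| is forced both ways
          have hlhs : check_trivial_unsat_go d ([x] :: rest) = true := by
            simp [check_trivial_unsat_go, hd, hb]
          simp only [hlhs, true_iff]
          refine ⟨|x|, ?_, ?_⟩
          · rcases hval : decide (x > 0) with _ | _
            · refine Or.inl ?_
              rw [hd]
              have hbt : b = true := by
                cases b with
                | true => rfl
                | false => exact absurd (by rw [hval]) hb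
              rw [hbt]
            · exact Or.inr ⟨x, List.mem_cons_self, rfl, hval⟩
          · rcases hval : decide (x > 0) with _ | _
            · exact Or.inr ⟨x, List.mem_cons_self, rfl, hval⟩
            · refine Or.inl ?_
              rw [hd]
              have hbf : b = false := by
                cases b with
                | false => rfl
                | true => exact absurd (by rw [hval]) hb
              rw [hbf]

lemma pv_alt_iff (clauses : List (List Int)) :
    check_trivial_unsat_alt clauses = true ↔
      ∃ v, pvForces PySem.Dict.empty (pvUnits clauses) v true ∧
           pvForces PySem.Dict.empty (pvUnits clauses) v false := by
  unfold check_trivial_unsat_alt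
  simp only [Bool.not_eq_true', List.isEmpty_eq_false_iff_exists_mem]
  constructor
  · rintro ⟨v, hv⟩
    have h := (PySem.Set.mem_inter _ _ _).mp hv
    rw [PySem.Set.mem_ofList, PySem.Set.mem_ofList] at h
    obtain ⟨hp, hn⟩ := h
    rw [List.mem_filterMap] at hp hn
    obtain ⟨cp, hcp, hfp⟩ := hp
    obtain ⟨cn, hcn, hfn⟩ := hn
    refine ⟨v, ?_, ?_⟩
    · match cp, hfp with
      | [x], hfp =>
        by_cases hx : x > 0
        · simp only [hx, if_true, Option.some.injEq] at hfp
          exact Or.inr ⟨x, by simpa [pvUnits, List.mem_filterMap] using ⟨[x], hcp, rfl⟩,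
            hfp, by simp [hx]⟩
        · simp [hx] at hfp
    · match cn, hfn with
      | [x], hfn =>
        by_cases hx : x ≤ 0
        · simp only [hx, if_true, Option.some.injEq] at hfn
          exact Or.inr ⟨x, by simpa [pvUnits, List.mem_filterMap] using ⟨[x], hcn, rfl⟩,
            hfn, by simp; omega⟩
        · simp [hx] at hfn
  · rintro ⟨v, ht, hf⟩
    rcases ht with h | ⟨x, hx, hxv, hxp⟩
    · simp [PySem.Dict.get?_empty] at h
    rcases hf with h | ⟨y, hy, hyv, hyn⟩
    · simp [PySem.Dict.get?_empty] at h
    have hxpos : x > 0 := of_decide_eq_true hxp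
    have hyneg : y ≤ 0 := by have := of_decide_eq_false hyn; omega
    simp only [pvUnits, List.mem_filterMap] at hx hy
    obtain ⟨c, hc, hcx⟩ := hx
    obtain ⟨c', hc', hcy⟩ := hy
    have hc1 : c = [x] := by
      match c, hcx with
      | [z], hcx => simp_all
    have hc2 : c' = [y] := by
      match c', hcy with
      | [z], hcy => simp_all
    subst hc1; subst hc2
    refine ⟨v, (PySem.Set.mem_inter _ _ _).mpr ⟨?_, ?_⟩⟩
    · rw [PySem.Set.mem_ofList, List.mem_filterMap]
      refine ⟨[x], hc, ?_⟩
      simp [hxpos, hxv]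
    · rw [PySem.Set.mem_ofList, List.mem_filterMap]
      refine ⟨[y], hc', ?_⟩
      simp [hyneg, hyv]

-- ===== VERDICT (by name: the statement is the Claim_ definition above) =====
theorem check_trivial_unsat_spec : Claim_equal_check_trivial_unsat := by
  intro clauses _
  unfold Spec_check_trivial_unsat check_trivial_unsat
  rw [Bool.eq_iff_iff, pv_go_iff, pv_alt_iff]
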